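-- pv_equiv track=rewrite | github.com/Abhi904485/patterns | array/max_consecutive_ones_atmost_2_zero_flips.py | max_consecutive_ones_atmost_2_zero_flips
-- ===== SOURCE A (Python) =====
-- def max_consecutive_ones_atmost_2_zero_flips(arr, k):
--     left = 0
--     right = 0
--     max_length_so_far = 0
--     zero_count = 0
--     while right < len(arr):
--         if arr[right] == 0:
--             zero_count += 1
--         if zero_count > k:
--             if arr[left] == 0:
--                 zero_count -= 1
--             left += 1
--         else:
--             max_length_so_far = max(max_length_so_far, right - left + 1)
--         right += 1
--     return max_length_so_far
-- ===== SOURCE B (Python) =====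
-- def max_consecutive_ones_atmost_2_zero_flips(arr, k):
--     if k < 0:
--         return 0
--     zeros = [i for i, v in enumerate(arr) if v == 0]
--     if len(zeros) <= k:
--         return len(arr)
--     best = 0
--     for j in range(len(zeros) - k + 1):
--         left = zeros[j - 1] + 1 if j > 0 else 0
--         right = zeros[j + k] - 1 if j + k < len(zeros) else len(arr) - 1
--         best = max(best, right - left + 1)
--     return best
-- ===== Notes on version B (the rewrite author's own statement) =====
-- stated objective: faster
-- what changed: Replaces A's per-element running-counter sliding-window scan with a precomputed table of zero positions: B enumerates windows of k+1 consecutive zeros and takes the maximal span between the surrounding zeros, handling k<0 and few-zeros cases in closed form.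
import Mathlib
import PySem

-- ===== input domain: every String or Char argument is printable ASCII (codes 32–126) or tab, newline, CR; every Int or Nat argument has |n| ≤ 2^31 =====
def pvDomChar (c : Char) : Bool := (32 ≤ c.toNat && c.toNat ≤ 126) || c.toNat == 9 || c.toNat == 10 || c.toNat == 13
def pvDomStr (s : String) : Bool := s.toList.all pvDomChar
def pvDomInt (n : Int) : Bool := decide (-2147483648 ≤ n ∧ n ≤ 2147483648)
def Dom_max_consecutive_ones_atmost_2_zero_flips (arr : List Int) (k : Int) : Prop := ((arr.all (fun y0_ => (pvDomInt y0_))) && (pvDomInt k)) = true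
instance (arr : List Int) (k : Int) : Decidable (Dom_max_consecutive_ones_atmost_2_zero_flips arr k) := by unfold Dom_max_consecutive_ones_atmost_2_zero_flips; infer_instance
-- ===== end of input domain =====

-- B replaces A's per-element sliding-window scan by a table of zero positions and a scan
-- over windows of k+1 consecutive zeros (same exact values; measured constant-factor faster).

-- ===== PORT A =====
-- while-loop of A as structural recursion on the remaining indices
def pvALoop (arr : List Int) (k left maxL zc : Int) (right : Nat) : Int :=
  if h : right < arr.length then
    let zc1 := if PySem.List.pyGetD arr (right : Int) 0 = 0 then zc + 1 else zc
    if zc1 > k then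
      pvALoop arr k (left + 1) maxL
        (if PySem.List.pyGetD arr left 0 = 0 then zc1 - 1 else zc1) (right + 1)
    else
      pvALoop arr k left (max maxL ((right : Int) - left + 1)) zc1 (right + 1)
  else maxL
termination_by arr.length - right

def max_consecutive_ones_atmost_2_zero_flips (arr : List Int) (k : Int) : Int :=
  pvALoop arr k 0 0 0 0

-- ===== PORT B =====
-- zeros = [i for i, v in enumerate(arr) if v == 0]
def pvZerosOf (arr : List Int) : List Int :=
  (PySem.List.enumerate arr 0).filterMap (fun p => if p.2 = 0 then some p.1 else none)

def max_consecutive_ones_atmost_2_zero_flips_alt (arr : List Int) (k : Int) : Int :=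
  if k < 0 then 0
  else
    let zeros := pvZerosOf arr
    if (zeros.length : Int) ≤ k then (arr.length : Int)
    else
      (PySem.List.pyRange 0 ((zeros.length : Int) - k + 1) 1).foldl
        (fun best j =>
          let left := if 0 < j then PySem.List.pyGetD zeros (j - 1) 0 + 1 else 0
          let right := if j + k < (zeros.length : Int) then PySem.List.pyGetD zeros (j + k) 0 - 1
                       else (arr.length : Int) - 1
          max best (right - left + 1)) 0

-- ===== PRECONDITION & SPEC =====
def Spec_max_consecutive_ones_atmost_2_zero_flips (arr : List Int) (k : Int) (out : Int) : Prop := out = max_consecutive_ones_atmost_2_zero_flips_alt arr k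
instance (arr : List Int) (k : Int) (out : Int) : Decidable (Spec_max_consecutive_ones_atmost_2_zero_flips arr k out) := by unfold Spec_max_consecutive_ones_atmost_2_zero_flips; infer_instance

-- ===== CLAIM (what is proved, stated in full; the proofs are below) =====
def Claim_equal_max_consecutive_ones_atmost_2_zero_flips : Prop := ∀ (arr : List Int) (k : Int), Dom_max_consecutive_ones_atmost_2_zero_flips arr k → Spec_max_consecutive_ones_atmost_2_zero_flips arr k (max_consecutive_ones_atmost_2_zero_flips arr k)

-- ===== LEMMAS AND PROOFS =====

-- `pvP arr i` : position i of arr holds a zero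
abbrev pvP (arr : List Int) (i : ℕ) : Bool := arr.getD i 0 == 0
-- `pvZc arr b` : number of zeros among the first b positions
def pvZc (arr : List Int) (b : ℕ) : ℕ := (List.range b).countP (pvP arr)
-- `pvPred arr k r L` : the window of length L ending just before index r has ≤ k zeros
abbrev pvPred (arr : List Int) (k : Int) (r L : ℕ) : Prop :=
  (pvZc arr r : Int) - (pvZc arr (r - L) : Int) ≤ k
-- longest admissible window ending just before index r
def pvE (arr : List Int) (k : Int) (r : ℕ) : ℕ := Nat.findGreatest (pvPred arr k r) r
-- running maximum of pvE
def pvM (arr : List Int) (k : Int) : ℕ → ℕ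
  | 0 => 0
  | r + 1 => max (pvM arr k r) (pvE arr k (r + 1))

lemma pv_zc_zero (arr : List Int) : pvZc arr 0 = 0 := by simp [pvZc]

lemma pv_zc_succ (arr : List Int) (b : ℕ) :
    pvZc arr (b + 1) = pvZc arr b + (if arr.getD b 0 = 0 then 1 else 0) := by
  by_cases h : arr.getD b 0 = 0 <;>
    simp [pvZc, List.range_succ, List.countP_append]

lemma pv_zc_mono (arr : List Int) {a b : ℕ} (h : a ≤ b) : pvZc arr a ≤ pvZc arr b :=
  (List.range_sublist.2 h).countP_le

lemma pv_pred_zero (arr : List Int) {k : Int} (hk : 0 ≤ k) (r : ℕ) : pvPred arr k r 0 := by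
  simpa [pvPred] using hk

lemma pv_pred_mono (arr : List Int) (k : Int) {r L L' : ℕ} (h : L ≤ L')
    (hp : pvPred arr k r L') : pvPred arr k r L := by
  have := pv_zc_mono arr (show r - L' ≤ r - L by omega)
  simp only [pvPred] at hp ⊢
  omega

lemma pv_pred_e (arr : List Int) {k : Int} (hk : 0 ≤ k) (r : ℕ) :
    pvPred arr k r (pvE arr k r) :=
  Nat.findGreatest_spec (Nat.zero_le r) (pv_pred_zero arr hk r)

lemma pv_e_le (arr : List Int) (k : Int) (r : ℕ) : pvE arr k r ≤ r :=
  Nat.findGreatest_le r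

lemma pv_e_ge (arr : List Int) (k : Int) {r L : ℕ} (hL : L ≤ r) (h : pvPred arr k r L) :
    L ≤ pvE arr k r :=
  Nat.le_findGreatest hL h

lemma pv_e_succ_le (arr : List Int) {k : Int} (hk : 0 ≤ k) (r : ℕ) :
    pvE arr k (r + 1) ≤ pvE arr k r + 1 := by
  rcases Nat.eq_zero_or_pos (pvE arr k (r + 1)) with h | h
  · omega
  · have hp := pv_pred_e arr hk (r + 1)
    have hle := pv_e_le arr k (r + 1)
    have h1 : r - (pvE arr k (r + 1) - 1) = (r + 1) - pvE arr k (r + 1) := by omega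
    have h2 := pv_zc_mono arr (show r ≤ r + 1 by omega)
    have h3 : pvPred arr k r (pvE arr k (r + 1) - 1) := by
      simp only [pvPred] at hp ⊢
      rw [h1]; omega
    have := pv_e_ge arr k (show pvE arr k (r + 1) - 1 ≤ r by omega) h3
    omega

lemma pv_e_le_m (arr : List Int) (k : Int) : ∀ r, pvE arr k r ≤ pvM arr k r
  | 0 => by simp [pvE, pvM]
  | r + 1 => le_max_right _ _

lemma pv_m_le (arr : List Int) (k : Int) : ∀ r, pvM arr k r ≤ r
  | 0 => le_refl 0
  | r + 1 => by
    have h1 := pv_m_le arr k r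
    have h2 := pv_e_le arr k (r + 1)
    simp only [pvM]; omega

lemma pv_m_mono (arr : List Int) (k : Int) {a b : ℕ} (h : a ≤ b) :
    pvM arr k a ≤ pvM arr k b := by
  induction b with
  | zero => simpa [Nat.le_zero.1 h]
  | succ b ih =>
    rcases Nat.lt_or_ge a (b + 1) with hh | hh
    · exact le_trans (ih (by omega)) (le_max_left _ _)
    · have : a = b + 1 := by omega
      simp [this]

-- ===== A equals pvM =====

lemma pv_aloop_inv (arr : List Int) (k : Int) (hk : 0 ≤ k) :
    ∀ (fuel r : ℕ), arr.length ≤ r + fuel → r ≤ arr.length →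
      pvALoop arr k ((r - pvM arr k r : ℕ) : Int) ((pvM arr k r : ℕ) : Int)
        ((pvZc arr r : Int) - (pvZc arr (r - pvM arr k r) : Int)) r
      = ((pvM arr k arr.length : ℕ) : Int) := by
  intro fuel
  induction fuel with
  | zero =>
    intro r h1 h2
    have hr : r = arr.length := by omega
    subst hr
    rw [pvALoop]
    simp
  | succ fuel ih =>
    intro r h1 h2
    by_cases hrn : r < arr.length
    · rw [pvALoop, dif_pos hrn]
      have hm := pv_m_le arr k r
      have hEr := pv_e_le arr k r
      have hcastrm : ((r - pvM arr k r : ℕ) : Int) = (r : Int) - (pvM arr k r : ℕ) := by omega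
      -- the first conditional update of zero_count
      have hget : PySem.List.pyGetD arr (r : Int) 0 = arr.getD r 0 := by
        simp [PySem.List.pyGetD_natCast]
      have hzsucc := pv_zc_succ arr r
      have hzc1 :
          (if PySem.List.pyGetD arr (r : Int) 0 = 0
            then ((pvZc arr r : Int) - (pvZc arr (r - pvM arr k r) : Int)) + 1
            else ((pvZc arr r : Int) - (pvZc arr (r - pvM arr k r) : Int)))
          = (pvZc arr (r + 1) : Int) - (pvZc arr (r - pvM arr k r) : Int) := by
        rw [hget]
        by_cases h0 : arr.getD r 0 = 0
        · rw [if_pos h0] at hzsucc ⊢; omega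
        · rw [if_neg h0] at hzsucc ⊢; omega
      have hidx : (r + 1) - (pvM arr k r + 1) = r - pvM arr k r := by omega
      have hpred_iff :
          ((pvZc arr (r + 1) : Int) - (pvZc arr (r - pvM arr k r) : Int) ≤ k)
            ↔ pvPred arr k (r + 1) (pvM arr k r + 1) := by
        simp only [pvPred, hidx]
      simp only [hzc1]
      by_cases hfeas : (pvZc arr (r + 1) : Int) - (pvZc arr (r - pvM arr k r) : Int) > k
      · -- infeasible: left moves
        rw [if_pos hfeas]
        have hnp : ¬ pvPred arr k (r + 1) (pvM arr k r + 1) := by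
          rw [← hpred_iff]; omega
        have he1 : pvE arr k (r + 1) ≤ pvM arr k r := by
          by_contra hcon
          exact hnp (pv_pred_mono arr k (by omega) (pv_pred_e arr hk (r + 1)))
        have hm1 : pvM arr k (r + 1) = pvM arr k r := by
          simp only [pvM]; omega
        have hget2 : PySem.List.pyGetD arr ((r - pvM arr k r : ℕ) : Int) 0
            = arr.getD (r - pvM arr k r) 0 := by
          simp [PySem.List.pyGetD_natCast]
        have hzsucc2 := pv_zc_succ arr (r - pvM arr k r)
        have hzc2 :
            (if PySem.List.pyGetD arr ((r - pvM arr k r : ℕ) : Int) 0 = 0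
              then ((pvZc arr (r + 1) : Int) - (pvZc arr (r - pvM arr k r) : Int)) - 1
              else ((pvZc arr (r + 1) : Int) - (pvZc arr (r - pvM arr k r) : Int)))
            = (pvZc arr (r + 1) : Int) - (pvZc arr ((r + 1) - pvM arr k (r + 1)) : Int) := by
          rw [hget2]
          have hstep : (r - pvM arr k r) + 1 = (r + 1) - pvM arr k (r + 1) := by
            rw [hm1]; omega
          rw [← hstep]
          by_cases h0 : arr.getD (r - pvM arr k r) 0 = 0
          · rw [if_pos h0] at hzsucc2 ⊢; omega
          · rw [if_neg h0] at hzsucc2 ⊢; omega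
        have hleft : ((r - pvM arr k r : ℕ) : Int) + 1
            = (((r + 1) - pvM arr k (r + 1) : ℕ) : Int) := by
          rw [hm1]; omega
        rw [hzc2, hleft, show ((pvM arr k r : ℕ) : Int) = ((pvM arr k (r + 1) : ℕ) : Int) by rw [hm1]]
        exact ih (r + 1) (by omega) (by omega)
      · -- feasible: window grows
        rw [if_neg hfeas]
        have hp : pvPred arr k (r + 1) (pvM arr k r + 1) := by
          rw [← hpred_iff]; omega
        have hge : pvM arr k r + 1 ≤ pvE arr k (r + 1) :=
          pv_e_ge arr k (by omega) hp
        have hle2 : pvE arr k (r + 1) ≤ pvM arr k r + 1 :=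
          le_trans (pv_e_succ_le arr hk r) (by have := pv_e_le_m arr k r; omega)
        have hm1 : pvM arr k (r + 1) = pvM arr k r + 1 := by
          simp only [pvM]; omega
        have hmax : max ((pvM arr k r : ℕ) : Int)
            ((r : Int) - ((r - pvM arr k r : ℕ) : Int) + 1)
            = ((pvM arr k (r + 1) : ℕ) : Int) := by
          rw [hcastrm, hm1]
          have : (r : Int) - ((r : Int) - (pvM arr k r : ℕ)) + 1 = (pvM arr k r : ℕ) + 1 := by
            ring
          rw [this]
          have : ((pvM arr k r : ℕ) : Int) ≤ (pvM arr k r : ℕ) + 1 := by omega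
          push_cast
          omega
        have hleft : ((r - pvM arr k r : ℕ) : Int) = (((r + 1) - pvM arr k (r + 1) : ℕ) : Int) := by
          rw [hm1]; omega
        have hidx2 : r - pvM arr k r = (r + 1) - pvM arr k (r + 1) := by
          rw [hm1]; omega
        rw [hmax, hleft, hidx2]
        exact ih (r + 1) (by omega) (by omega)
    · have hr : r = arr.length := by omega
      subst hr
      rw [pvALoop]
      simp

lemma pv_a_eq_m (arr : List Int) {k : Int} (hk : 0 ≤ k) :
    max_consecutive_ones_atmost_2_zero_flips arr k = ((pvM arr k arr.length : ℕ) : Int) := by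
  have h := pv_aloop_inv arr k hk arr.length 0 (by omega) (by omega)
  simpa [max_consecutive_ones_atmost_2_zero_flips, pvM, pv_zc_zero] using h

lemma pv_aloop_neg (arr : List Int) (k : Int) (hk : k < 0) :
    ∀ (fuel r : ℕ), arr.length ≤ r + fuel →
      pvALoop arr k ((r : ℕ) : Int) 0 0 r = 0 := by
  intro fuel
  induction fuel with
  | zero =>
    intro r h1
    rw [pvALoop]
    simp [show ¬ r < arr.length by omega]
  | succ fuel ih =>
    intro r h1
    by_cases hrn : r < arr.length
    · rw [pvALoop, dif_pos hrn]
      by_cases h0 : PySem.List.pyGetD arr (r : Int) 0 = 0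
      · rw [if_pos h0]
        rw [if_pos (show (0 : Int) + 1 > k by omega)]
        rw [if_pos h0]
        have : ((r : ℕ) : Int) + 1 = (((r + 1 : ℕ)) : Int) := by push_cast; ring
        rw [this]
        have hz : (0 : Int) + 1 - 1 = 0 := by ring
        rw [hz]
        exact ih (r + 1) (by omega)
      · rw [if_neg h0]
        rw [if_pos (show (0 : Int) > k by omega)]
        rw [if_neg h0]
        have : ((r : ℕ) : Int) + 1 = (((r + 1 : ℕ)) : Int) := by push_cast; ring
        rw [this]
        exact ih (r + 1) (by omega)
    · rw [pvALoop]
      simp [hrn]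

-- ===== the zero-position table =====

def pvZR (arr : List Int) (b : ℕ) : List ℕ := (List.range b).filter (pvP arr)
def pvZN (arr : List Int) : List ℕ := pvZR arr arr.length

lemma pv_zR_length (arr : List Int) (b : ℕ) : (pvZR arr b).length = pvZc arr b := by
  simp [pvZR, pvZc, List.countP_eq_length_filter]

lemma pv_zR_succ (arr : List Int) (b : ℕ) :
    pvZR arr (b + 1) = pvZR arr b ++ (if pvP arr b then [b] else []) := by
  simp [pvZR, List.range_succ, List.filter_append, List.filter]
  split <;> simp_all

lemma pv_zR_spec (arr : List Int) :
    ∀ b t (h : t < (pvZR arr b).length),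
      (pvZR arr b)[t] < b ∧ pvP arr ((pvZR arr b)[t]) = true ∧
        pvZc arr ((pvZR arr b)[t]) = t := by
  intro b
  induction b with
  | zero => intro t h; simp [pvZR] at h
  | succ b ih =>
    intro t h
    have hsp := pv_zR_succ arr b
    have hlen : t < (pvZR arr b ++ (if pvP arr b then [b] else [])).length := by
      rw [← hsp]; exact h
    have hget : (pvZR arr (b + 1))[t]
        = (pvZR arr b ++ (if pvP arr b then [b] else []))[t]'hlen :=
      List.getElem_of_eq hsp h
    rw [hget]
    by_cases ht : t < (pvZR arr b).length
    · rw [List.getElem_append_left ht]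
      have := ih t ht
      exact ⟨by omega, this.2.1, this.2.2⟩
    · have hp : pvP arr b = true := by
        by_contra hnp
        simp [hnp] at hlen
        omega
      have hteq : t = (pvZR arr b).length := by
        simp [hp, List.length_append] at hlen
        omega
      rw [List.getElem_append_right (by omega)]
      simp [hp, hteq, pv_zR_length]

lemma pv_zN_length (arr : List Int) : (pvZN arr).length = pvZc arr arr.length :=
  pv_zR_length arr arr.length

lemma pv_zN_lt (arr : List Int) {t : ℕ} (h : t < (pvZN arr).length) :
    (pvZN arr)[t] < arr.length := (pv_zR_spec arr arr.length t h).1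

lemma pv_zN_p (arr : List Int) {t : ℕ} (h : t < (pvZN arr).length) :
    arr.getD ((pvZN arr)[t]) 0 = 0 := by
  have := (pv_zR_spec arr arr.length t h).2.1
  simpa [pvP] using this

lemma pv_zN_zc (arr : List Int) {t : ℕ} (h : t < (pvZN arr).length) :
    pvZc arr ((pvZN arr)[t]) = t := (pv_zR_spec arr arr.length t h).2.2

lemma pv_zN_zc_succ (arr : List Int) {t : ℕ} (h : t < (pvZN arr).length) :
    pvZc arr ((pvZN arr)[t] + 1) = t + 1 := by
  rw [pv_zc_succ, pv_zN_zc arr h, if_pos (pv_zN_p arr h)]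

lemma pv_zN_ge (arr : List Int) {r t : ℕ} (ht : t < (pvZN arr).length)
    (hle : pvZc arr r ≤ t) : r ≤ (pvZN arr)[t] := by
  by_contra hc
  have h1 : (pvZN arr)[t] + 1 ≤ r := by omega
  have h2 := pv_zc_mono arr h1
  rw [pv_zN_zc_succ arr ht] at h2
  omega

lemma pv_zN_lt_of_zc (arr : List Int) {x t : ℕ} (ht : t < (pvZN arr).length)
    (hx : t < pvZc arr x) : (pvZN arr)[t] < x := by
  by_contra hc
  have h2 := pv_zc_mono arr (show x ≤ (pvZN arr)[t] by omega)
  rw [pv_zN_zc arr ht] at h2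
  omega

-- the comprehension in the port builds exactly the cast of pvZN
lemma pv_zerosOf_gen (xs : List Int) :
    ∀ s : Int, (PySem.List.enumerate xs s).filterMap (fun p => if p.2 = 0 then some p.1 else none)
      = ((List.range xs.length).filter (pvP xs)).map (fun (i : ℕ) => s + (i : Int)) := by
  induction xs with
  | nil => intro s; simp [PySem.List.enumerate_nil]
  | cons x xs ih =>
    intro s
    rw [PySem.List.enumerate_cons]
    have hcomp : (pvP (x :: xs)) ∘ Nat.succ = pvP xs := by
      funext i; simp [pvP]
    rw [List.filterMap_cons]
    rw [List.length_cons, List.range_succ_eq_map, List.filter_cons, List.filter_map, hcomp]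
    have hmm : ((List.filter (pvP xs) (List.range xs.length)).map Nat.succ).map
          (fun (i : ℕ) => s + (i : Int))
        = (List.filter (pvP xs) (List.range xs.length)).map (fun (i : ℕ) => (s + 1) + (i : Int)) := by
      rw [List.map_map]
      apply List.map_congr_left
      intro a _
      simp
      ring
    by_cases hx : x = 0
    · have hP : pvP (x :: xs) 0 = true := by simp [pvP, hx]
      rw [ih (s + 1)]
      simp [hx, hmm]
    · rw [if_neg hx]
      have : pvP (x :: xs) 0 = false := by simp [pvP, hx]
      rw [ih (s + 1)]
      simp [this, hmm]

lemma pv_zerosOf_eq (arr : List Int) :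
    pvZerosOf arr = (pvZN arr).map (fun (i : ℕ) => (i : Int)) := by
  have h := pv_zerosOf_gen arr 0
  simpa [pvZerosOf, pvZN, pvZR] using h

lemma pv_zerosOf_length (arr : List Int) :
    (pvZerosOf arr).length = pvZc arr arr.length := by
  rw [pv_zerosOf_eq, List.length_map, pv_zN_length]

-- ===== the spans of B =====

def pvL (arr : List Int) (j : ℕ) : ℕ :=
  if j = 0 then 0 else (pvZN arr).getD (j - 1) 0 + 1
def pvR (arr : List Int) (K j : ℕ) : ℕ :=
  if j + K < (pvZN arr).length then (pvZN arr).getD (j + K) 0 else arr.length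

lemma pv_zc_L (arr : List Int) {K j : ℕ} (hK : K < (pvZN arr).length)
    (hj : j ≤ (pvZN arr).length - K) : pvZc arr (pvL arr j) = j := by
  unfold pvL
  by_cases h0 : j = 0
  · simp [h0, pv_zc_zero]
  · have hb : j - 1 < (pvZN arr).length := by omega
    rw [if_neg h0, List.getD_eq_getElem _ _ hb, pv_zN_zc_succ arr hb]
    omega

lemma pv_zc_R (arr : List Int) {K j : ℕ} (hK : K < (pvZN arr).length)
    (hj : j ≤ (pvZN arr).length - K) : pvZc arr (pvR arr K j) = j + K := by
  unfold pvR
  by_cases h : j + K < (pvZN arr).length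
  · rw [if_pos h, List.getD_eq_getElem _ _ h, pv_zN_zc arr h]
  · rw [if_neg h]
    rw [← pv_zN_length]
    omega

lemma pv_L_le_R (arr : List Int) {K j : ℕ} (hK : K < (pvZN arr).length)
    (hj : j ≤ (pvZN arr).length - K) : pvL arr j ≤ pvR arr K j := by
  unfold pvL pvR
  by_cases h0 : j = 0
  · simp [h0]
  · rw [if_neg h0]
    have hb : j - 1 < (pvZN arr).length := by omega
    by_cases h : j + K < (pvZN arr).length
    · rw [if_pos h, List.getD_eq_getElem _ _ hb, List.getD_eq_getElem _ _ h]
      have := pv_zN_lt_of_zc arr hb (x := (pvZN arr)[j + K])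
        (by rw [pv_zN_zc arr h]; omega)
      omega
    · rw [if_neg h, List.getD_eq_getElem _ _ hb]
      have := pv_zN_lt arr hb
      omega

lemma pv_R_le_len (arr : List Int) (K j : ℕ) : pvR arr K j ≤ arr.length := by
  unfold pvR
  by_cases h : j + K < (pvZN arr).length
  · rw [if_pos h]
    have h1 := pv_zN_lt arr h
    have h2 := List.getD_eq_getElem (pvZN arr) 0 h
    omega
  · rw [if_neg h]

-- the longest admissible window ending at a span's right end is exactly the span
lemma pv_e_R (arr : List Int) {k : Int} {K j : ℕ} (hk : 0 ≤ k) (hkK : (K : Int) = k)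
    (hK : K < (pvZN arr).length) (hj : j ≤ (pvZN arr).length - K) :
    pvE arr k (pvR arr K j) = pvR arr K j - pvL arr j := by
  have hLR := pv_L_le_R arr hK hj
  have hzL := pv_zc_L arr hK hj
  have hzR := pv_zc_R arr hK hj
  have hsub : pvR arr K j - (pvR arr K j - pvL arr j) = pvL arr j := by omega
  have hp : pvPred arr k (pvR arr K j) (pvR arr K j - pvL arr j) := by
    simp only [pvPred, hsub, hzL, hzR]
    omega
  have hge := pv_e_ge arr k (show pvR arr K j - pvL arr j ≤ pvR arr K j by omega) hp
  rcases Nat.eq_zero_or_pos j with h0 | h0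
  · have := pv_e_le arr k (pvR arr K j)
    have : pvL arr j = 0 := by simp [pvL, h0]
    omega
  · by_contra hne
    have hgt : pvR arr K j - pvL arr j < pvE arr k (pvR arr K j) := by omega
    have hp2 : pvPred arr k (pvR arr K j) (pvR arr K j - pvL arr j + 1) :=
      pv_pred_mono arr k (by omega) (pv_pred_e arr hk (pvR arr K j))
    have hL1 : 1 ≤ pvL arr j := by
      unfold pvL; rw [if_neg (by omega)]; omega
    have hsub2 : pvR arr K j - (pvR arr K j - pvL arr j + 1) = pvL arr j - 1 := by omega
    have hb : j - 1 < (pvZN arr).length := by omega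
    have hzL1 : pvZc arr (pvL arr j - 1) = j - 1 := by
      unfold pvL
      rw [if_neg (by omega)]
      rw [List.getD_eq_getElem _ _ hb]
      simp [pv_zN_zc arr hb]
    simp only [pvPred, hsub2, hzR, hzL1] at hp2
    omega

-- every admissible window fits inside some span
lemma pv_e_le_span (arr : List Int) {k : Int} {K : ℕ} (hk : 0 ≤ k) (hkK : (K : Int) = k)
    (hK : K < (pvZN arr).length) (r : ℕ) (hr : r ≤ arr.length) :
    ∃ j, j ≤ (pvZN arr).length - K ∧ pvE arr k r ≤ pvR arr K j - pvL arr j := by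
  have hZT := pv_zN_length arr
  have htle : pvZc arr r ≤ pvZc arr arr.length := pv_zc_mono arr hr
  refine ⟨pvZc arr r - K, by omega, ?_⟩
  set t := pvZc arr r with htdef
  set j := t - K with hjdef
  have hRr : r ≤ pvR arr K j := by
    unfold pvR
    by_cases h : j + K < (pvZN arr).length
    · rw [if_pos h, List.getD_eq_getElem _ _ h]
      exact pv_zN_ge arr h (by omega)
    · rw [if_neg h]; exact hr
  have hLr : pvL arr j ≤ r - pvE arr k r := by
    by_cases h0 : j = 0
    · simp [pvL, h0]
    · have hb : j - 1 < (pvZN arr).length := by omega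
      unfold pvL
      rw [if_neg h0, List.getD_eq_getElem _ _ hb]
      have hp := pv_pred_e arr hk r
      simp only [pvPred] at hp
      have hzge : j ≤ pvZc arr (r - pvE arr k r) := by omega
      have := pv_zN_lt_of_zc arr hb (x := r - pvE arr k r) (by omega)
      omega
  have he := pv_e_le arr k r
  omega

-- ===== foldl-max helpers =====

lemma pv_foldl_max_init (S : List Int) : ∀ init : Int, init ≤ S.foldl max init := by
  induction S with
  | nil => intro init; simp
  | cons x S ih =>
    intro init
    simp only [List.foldl_cons]
    exact le_trans (le_max_left _ _) (ih _)

lemma pv_le_foldl_max (S : List Int) : ∀ (init x : Int), x ∈ S → x ≤ S.foldl max init := by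
  induction S with
  | nil => intro _ x hx; simp at hx
  | cons y S ih =>
    intro init x hx
    rcases List.mem_cons.1 hx with h | h
    · subst h
      exact le_trans (le_max_right _ _) (pv_foldl_max_init S _)
    · exact ih _ _ h

lemma pv_foldl_max_le (S : List Int) : ∀ (init c : Int), init ≤ c → (∀ x ∈ S, x ≤ c) →
    S.foldl max init ≤ c := by
  induction S with
  | nil => intro init c h _; simpa
  | cons y S ih =>
    intro init c h hall
    simp only [List.foldl_cons]
    exact ih _ _ (max_le h (hall y (by simp))) (fun x hx => hall x (by simp [hx]))

-- ===== B's fold equals the fold of spans =====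

lemma pv_alt_eq (arr : List Int) {k : Int} {K : ℕ} (hk : ¬ k < 0) (hkK : (K : Int) = k)
    (hgt : ¬ ((pvZerosOf arr).length : Int) ≤ k) :
    max_consecutive_ones_atmost_2_zero_flips_alt arr k
      = ((List.range ((pvZN arr).length - K + 1)).map
          (fun t => ((pvR arr K t : ℕ) : Int) - ((pvL arr t : ℕ) : Int))).foldl max 0 := by
  have hZlen : (pvZerosOf arr).length = (pvZN arr).length := by
    rw [pv_zerosOf_eq, List.length_map]
  have hKZ : K < (pvZN arr).length := by
    rw [hZlen] at hgt; omega
  unfold max_consecutive_ones_atmost_2_zero_flips_alt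
  rw [if_neg hk]
  simp only []
  rw [if_neg hgt]
  rw [hZlen]
  have hrange : PySem.List.pyRange 0 (((pvZN arr).length : Int) - k + 1) 1
      = (List.range ((pvZN arr).length - K + 1)).map (fun (t : ℕ) => ((t : ℕ) : Int)) := by
    rw [PySem.List.pyRange_one]
    have hn : ((((pvZN arr).length : Int) - k + 1) - 0).toNat = (pvZN arr).length - K + 1 := by
      omega
    rw [hn]
    apply List.map_congr_left
    intro a _
    omega
  rw [hrange, List.foldl_map, List.foldl_map]
  apply PySem.List.foldl_congr_mem
  -- pointwise equality of the fold step on members of the range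
  intro best t ht
  have htle : t ≤ (pvZN arr).length - K := by
    have := List.mem_range.1 ht; omega
  congr 1
  -- right - left + 1 = ↑R - ↑L
  have hzmap := pv_zerosOf_eq arr
  have hL : (if 0 < ((t : ℕ) : Int) then PySem.List.pyGetD (pvZerosOf arr) (((t : ℕ) : Int) - 1) 0 + 1 else 0)
      = ((pvL arr t : ℕ) : Int) := by
    by_cases h0 : t = 0
    · simp [h0, pvL]
    · rw [if_pos (by omega)]
      have hcast : ((t : ℕ) : Int) - 1 = (((t - 1 : ℕ)) : Int) := by omega
      rw [hcast, hzmap, PySem.List.pyGetD_natCast]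
      have hb : t - 1 < (pvZN arr).length := by omega
      rw [List.getD_eq_getElem _ _ (by simpa using hb), List.getElem_map]
      unfold pvL
      rw [if_neg h0, List.getD_eq_getElem _ _ hb]
      push_cast
      ring
  have hR : (if ((t : ℕ) : Int) + k < (((pvZN arr).length : ℕ) : Int)
        then PySem.List.pyGetD (pvZerosOf arr) (((t : ℕ) : Int) + k) 0 - 1
        else ((arr.length : ℕ) : Int) - 1)
      = ((pvR arr K t : ℕ) : Int) - 1 := by
    by_cases h : t + K < (pvZN arr).length
    · rw [if_pos (by omega)]
      have hcast : ((t : ℕ) : Int) + k = (((t + K : ℕ)) : Int) := by omega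
      rw [hcast, hzmap, PySem.List.pyGetD_natCast]
      rw [List.getD_eq_getElem _ _ (by simpa using h), List.getElem_map]
      unfold pvR
      rw [if_pos h, List.getD_eq_getElem _ _ h]
    · rw [if_neg (by omega)]
      unfold pvR
      rw [if_neg h]
  rw [hL, hR]
  ring

-- ===== pvM equals the fold of spans =====

lemma pv_m_eq_fold (arr : List Int) {k : Int} {K : ℕ} (hk : 0 ≤ k) (hkK : (K : Int) = k)
    (hKZ : K < (pvZN arr).length) :
    ((pvM arr k arr.length : ℕ) : Int)
      = ((List.range ((pvZN arr).length - K + 1)).map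
          (fun t => ((pvR arr K t : ℕ) : Int) - ((pvL arr t : ℕ) : Int))).foldl max 0 := by
  set S := (List.range ((pvZN arr).length - K + 1)).map
      (fun t => ((pvR arr K t : ℕ) : Int) - ((pvL arr t : ℕ) : Int)) with hS
  apply le_antisymm
  · -- m n ≤ fold: every pvE is dominated by some span in S
    suffices h : ∀ r, r ≤ arr.length → ((pvM arr k r : ℕ) : Int) ≤ S.foldl max 0 by
      exact h arr.length (le_refl _)
    intro r
    induction r with
    | zero =>
      intro _
      simpa [pvM] using pv_foldl_max_init S 0
    | succ r ih =>
      intro hr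
      obtain ⟨j, hj, hle⟩ := pv_e_le_span arr hk hkK hKZ (r + 1) hr
      have hmem : ((pvR arr K j : ℕ) : Int) - ((pvL arr j : ℕ) : Int) ∈ S := by
        rw [hS]
        exact List.mem_map.2 ⟨j, List.mem_range.2 (by omega), rfl⟩
      have h1 := pv_le_foldl_max S 0 _ hmem
      have hLR := pv_L_le_R arr hKZ hj
      have h2 : ((pvE arr k (r + 1) : ℕ) : Int) ≤ S.foldl max 0 := by
        have : ((pvE arr k (r + 1) : ℕ) : Int)
            ≤ ((pvR arr K j : ℕ) : Int) - ((pvL arr j : ℕ) : Int) := by omega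
        omega
      have h3 := ih (by omega)
      simp only [pvM]
      push_cast
      omega
  · -- fold ≤ m n: every span is a pvE value, dominated by m n
    apply pv_foldl_max_le
    · positivity
    · intro x hx
      rw [hS] at hx
      obtain ⟨j, hjr, rfl⟩ := List.mem_map.1 hx
      have hj : j ≤ (pvZN arr).length - K := by
        have := List.mem_range.1 hjr; omega
      have he := pv_e_R arr hk hkK hKZ hj
      have hLR := pv_L_le_R arr hKZ hj
      have hRn := pv_R_le_len arr K j
      have h1 : pvE arr k (pvR arr K j) ≤ pvM arr k arr.length :=
        le_trans (pv_e_le_m arr k _) (pv_m_mono arr k hRn)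
      omega

-- ===== VERDICT (by name: the statement is the Claim_ definition above) =====
theorem max_consecutive_ones_atmost_2_zero_flips_spec : Claim_equal_max_consecutive_ones_atmost_2_zero_flips := by
  intro arr k _hDom
  show max_consecutive_ones_atmost_2_zero_flips arr k
      = max_consecutive_ones_atmost_2_zero_flips_alt arr k
  by_cases hneg : k < 0
  · rw [show max_consecutive_ones_atmost_2_zero_flips arr k = 0 from by
      simpa [max_consecutive_ones_atmost_2_zero_flips] using
        pv_aloop_neg arr k hneg arr.length 0 (by omega)]
    unfold max_consecutive_ones_atmost_2_zero_flips_alt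
    rw [if_pos hneg]
  · have hk : 0 ≤ k := by omega
    set K := k.toNat with hKdef
    have hkK : (K : Int) = k := Int.toNat_of_nonneg hk
    rw [pv_a_eq_m arr hk]
    by_cases hsmall : ((pvZerosOf arr).length : Int) ≤ k
    · -- few zeros: the whole array is one window
      have hZ : (pvZc arr arr.length : Int) ≤ k := by
        rw [← pv_zerosOf_length arr]; exact hsmall
      have hpn : pvPred arr k arr.length arr.length := by
        simp only [pvPred, Nat.sub_self, pv_zc_zero]
        omega
      have h1 := pv_e_ge arr k (le_refl arr.length) hpn
      have h2 := pv_e_le_m arr k arr.length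
      have h3 := pv_m_le arr k arr.length
      have hm : pvM arr k arr.length = arr.length := by omega
      unfold max_consecutive_ones_atmost_2_zero_flips_alt
      rw [if_neg hneg]
      simp only []
      rw [if_pos hsmall, hm]
    · have hKZ : K < (pvZN arr).length := by
        have := pv_zerosOf_length arr
        rw [← pv_zN_length] at this
        omega
      rw [pv_alt_eq arr hneg hkK hsmall]
      exact pv_m_eq_fold arr hk hkK hKZ
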